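-- pv_equiv track=rewrite | github.com/pypi-data/pypi-mirror-331 | packages/pyutplugins/pyutplugins-3.2.6.tar.gz/pyutplugins-3.2.6/src/pyutplugins/ioplugins/java/JavaReader.py | _isClassBeginning
-- ===== SOURCE A (Python) =====
-- CLASS_MODIFIER   = ["public", "protected", "private", "abstract", "final", "static", "strictfp"]
--
-- def _isClassBeginning(lstFile, currentPos):
--     """
--     Return True if the specified line is a class beginning
--
--     @param lstFile : list of instructions read from the file to analyze
--     @param currentPos : current position in the list
--     @return bool : True if the specified line do begin a class
--     @author C.Dutoit
--     @since 1.0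
--     """
--     lstUsedCM = []  # List of used class modifiers
--     # Evaluate each argument
--     pos = currentPos
--     while pos < len(lstFile):
--         el = lstFile[pos]
--         # Is current argument a class modifier ?
--         if el in CLASS_MODIFIER:
--             # if not modified, add it as modifiers list
--             if not (el in lstUsedCM):
--                 lstUsedCM.append(el)
--             else:  # Already used => not a valid class beginning
--                 # TODO : print warning ?
--                 return False
--         elif el == "class":  # class token => this is a class
--             return True
--         elif el == "interface":  # interface token => take it as a class
--             return True
--         else:  # unacceptable token => not a class beginning
--             return False
--         pos += 1
--     return False
-- ===== SOURCE B (Python) =====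
-- CLASS_MODIFIER = ["public", "protected", "private", "abstract", "final", "static", "strictfp"]
--
-- def _isClassBeginning(lstFile, currentPos):
--     # A duplicate-free run of class modifiers can be at most 7 long (there are
--     # only 7 modifiers), so the 'class'/'interface' keyword can only sit at one
--     # of the first 8 offsets.  Test each candidate offset declaratively -- no
--     # scanning loop with accumulator state and early returns.
--     n = len(lstFile)
--     return any(
--         currentPos + k < n
--         and lstFile[currentPos + k] in ("class", "interface")
--         and all(lstFile[currentPos + i] in CLASS_MODIFIER for i in range(k))
--         and len({lstFile[currentPos + i] for i in range(k)}) == k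
--         for k in range(8)
--     )
-- ===== Notes on version B (the rewrite author's own statement) =====
-- stated objective: alternative
-- what changed: B replaces A's stateful left-to-right scan (accumulating used modifiers with early returns) by a bounded declarative search: since a duplicate-free run of class modifiers is at most 7 long, B tests each of the 8 candidate keyword offsets with an any/all/set-comprehension predicate.
import Mathlib
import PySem

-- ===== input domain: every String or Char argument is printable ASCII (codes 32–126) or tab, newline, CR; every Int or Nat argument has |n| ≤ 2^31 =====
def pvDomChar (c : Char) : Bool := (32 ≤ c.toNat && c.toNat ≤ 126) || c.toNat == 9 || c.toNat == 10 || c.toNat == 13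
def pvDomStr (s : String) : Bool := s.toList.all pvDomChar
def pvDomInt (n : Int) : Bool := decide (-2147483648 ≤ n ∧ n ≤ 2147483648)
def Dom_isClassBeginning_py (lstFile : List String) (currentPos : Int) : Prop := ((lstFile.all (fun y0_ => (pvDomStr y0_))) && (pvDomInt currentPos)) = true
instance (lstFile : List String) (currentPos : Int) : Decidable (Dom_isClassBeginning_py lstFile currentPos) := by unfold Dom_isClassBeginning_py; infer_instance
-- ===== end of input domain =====

-- B replaces A's stateful scan by a bounded declarative search: a duplicate-free
-- modifier run is at most 7 long, so only offsets 0..7 can hold the keyword (objective: alternative).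

def CLASS_MODIFIER : List String :=
  ["public", "protected", "private", "abstract", "final", "static", "strictfp"]

-- ===== PORT A =====
-- A's while-loop: state (lstUsedCM, pos); the 'none' case of pyGet? is Python's
-- IndexError (possible only when currentPos < -len), excluded by Pre_.
def isClassBeginningLoop (lstFile : List String) (lstUsedCM : List String) (pos : Int) : Bool :=
  if _h : pos < (lstFile.length : Int) then
    match PySem.List.pyGet? lstFile pos with
    | none => false
    | some el =>
      if CLASS_MODIFIER.contains el then
        if !(lstUsedCM.contains el) then
          isClassBeginningLoop lstFile (lstUsedCM ++ [el]) (pos + 1)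
        else false
      else if el = "class" then true
      else if el = "interface" then true
      else false
  else false
termination_by ((lstFile.length : Int) - pos).toNat
decreasing_by omega

def isClassBeginning_py (lstFile : List String) (currentPos : Int) : Bool :=
  isClassBeginningLoop lstFile [] currentPos

-- ===== PORT B =====
-- The body of Source B's 'any' generator at candidate offset k; the 'none' cases of
-- pyGet? are Python's IndexError (only when currentPos < -len), excluded by Pre_.
def altBody (lstFile : List String) (currentPos : Int) (k : Int) : Bool :=
  decide (currentPos + k < (lstFile.length : Int))
  && (match PySem.List.pyGet? lstFile (currentPos + k) with
      | none => false
      | some tok => (tok = "class" || tok = "interface"))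
  && ((PySem.List.pyRange 0 k 1).all fun i =>
      match PySem.List.pyGet? lstFile (currentPos + i) with
      | none => false
      | some t => CLASS_MODIFIER.contains t)
  && decide (((PySem.Set.ofList ((PySem.List.pyRange 0 k 1).map fun i =>
        (PySem.List.pyGet? lstFile (currentPos + i)).getD "")).length : Int) = k)

def isClassBeginning_py_alt (lstFile : List String) (currentPos : Int) : Bool :=
  (PySem.List.pyRange 0 8 1).any (altBody lstFile currentPos)

-- ===== PRECONDITION & SPEC =====
-- A (and B) raise IndexError exactly when currentPos < -len(lstFile); those inputs are excluded.
def Pre_isClassBeginning_py (lstFile : List String) (currentPos : Int) : Prop :=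
  -(lstFile.length : Int) ≤ currentPos
instance (lstFile : List String) (currentPos : Int) : Decidable (Pre_isClassBeginning_py lstFile currentPos) := by unfold Pre_isClassBeginning_py; infer_instance

def pvWitness_isClassBeginning_py : List String × Int := (["public", "class", "A"], 0)

def Spec_isClassBeginning_py (lstFile : List String) (currentPos : Int) (out : Bool) : Prop := out = isClassBeginning_py_alt lstFile currentPos
instance (lstFile : List String) (currentPos : Int) (out : Bool) : Decidable (Spec_isClassBeginning_py lstFile currentPos out) := by unfold Spec_isClassBeginning_py; infer_instance

-- ===== CLAIM (what is proved, stated in full; the proofs are below) =====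
def Claim_equal_isClassBeginning_py : Prop := ∀ (lstFile : List String) (currentPos : Int), Dom_isClassBeginning_py lstFile currentPos → Pre_isClassBeginning_py lstFile currentPos → Spec_isClassBeginning_py lstFile currentPos (isClassBeginning_py lstFile currentPos)

-- ===== LEMMAS AND PROOFS =====

-- tok lstFile p: the element Python reads at index p (total form; in-range under Pre_).
def tok (lstFile : List String) (p : Int) : String :=
  (PySem.List.pyGet? lstFile p).getD ""

-- The prefix of k tokens read from position pos.
def pref (lstFile : List String) (pos : Int) (k : ℕ) : List String :=
  List.map (fun i : ℕ => tok lstFile (pos + (i : Int))) (List.range k)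

-- The common specification: offset k holds 'class'/'interface' and the k tokens
-- before it are distinct class modifiers.
def Good (lstFile : List String) (used : List String) (pos : Int) (k : ℕ) : Prop :=
  pos + (k : Int) < (lstFile.length : Int)
  ∧ (tok lstFile (pos + k) = "class" ∨ tok lstFile (pos + k) = "interface")
  ∧ (∀ s ∈ pref lstFile pos k, s ∈ CLASS_MODIFIER)
  ∧ (pref lstFile pos k).Nodup
  ∧ (∀ s ∈ pref lstFile pos k, s ∉ used)

lemma pyGet?_eq_some_tok (lstFile : List String) (p : Int)
    (h1 : -(lstFile.length : Int) ≤ p) (h2 : p < (lstFile.length : Int)) :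
    PySem.List.pyGet? lstFile p = some (tok lstFile p) := by
  cases hg : PySem.List.pyGet? lstFile p with
  | none =>
    rw [PySem.List.pyGet?_eq_none_iff] at hg
    exact absurd ⟨h1, h2⟩ hg
  | some s => simp [tok, hg]

lemma pref_zero (lstFile : List String) (pos : Int) : pref lstFile pos 0 = [] := rfl

lemma pref_succ (lstFile : List String) (pos : Int) (k : ℕ) :
    pref lstFile pos (k + 1) = tok lstFile pos :: pref lstFile (pos + 1) k := by
  unfold pref
  rw [List.range_succ_eq_map, List.map_cons, List.map_map]
  congr 1
  · norm_num
  · apply List.map_congr_left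
    intro i _
    simp only [Function.comp_apply]
    congr 1
    push_cast
    ring

lemma class_not_mod : "class" ∉ CLASS_MODIFIER := by decide
lemma interface_not_mod : "interface" ∉ CLASS_MODIFIER := by decide

-- A's loop computes exactly the Good specification (for duplicate-free used).
lemma loop_iff_good (lstFile : List String) (used : List String) (pos : Int)
    (hpre : -(lstFile.length : Int) ≤ pos) (hnd : used.Nodup) :
    isClassBeginningLoop lstFile used pos = true ↔ ∃ k, Good lstFile used pos k := by
  rw [isClassBeginningLoop]
  split
  · rename_i h
    rw [pyGet?_eq_some_tok lstFile pos hpre h]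
    set el := tok lstFile pos with hel
    dsimp only
    by_cases hc : CLASS_MODIFIER.contains el = true
    · rw [if_pos hc]
      have helm : el ∈ CLASS_MODIFIER := by simpa using hc
      by_cases hm : used.contains el = true
      · have hmem : el ∈ used := by simpa using hm
        rw [if_neg (by simp [hmem])]
        simp only [Bool.false_eq_true, false_iff]
        rintro ⟨k, hk1, hk2, hk3, hk4, hk5⟩
        cases k with
        | zero =>
          simp only [Nat.cast_zero, add_zero] at hk2
          rcases hk2 with h2 | h2 <;> rw [hel, h2] at helm
          · exact class_not_mod helm
          · exact interface_not_mod helm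
        | succ k' =>
          have : el ∈ pref lstFile pos (k' + 1) := by
            rw [pref_succ]; exact List.mem_cons_self
          exact hk5 el this hmem
      · have hmem : el ∉ used := by simpa using hm
        rw [if_pos (by simp [hmem])]
        have hnd2 : (used ++ [el]).Nodup := by
          refine List.Nodup.append hnd (List.nodup_singleton el) ?_
          intro a ha hb
          simp only [List.mem_singleton] at hb
          exact hmem (hb ▸ ha)
        rw [loop_iff_good lstFile (used ++ [el]) (pos + 1) (by omega) hnd2]
        constructor
        · rintro ⟨k, hk1, hk2, hk3, hk4, hk5⟩
          refine ⟨k + 1, ?_, ?_, ?_, ?_, ?_⟩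
          · push_cast; omega
          · have : pos + ((k : ℕ) + 1 : ℕ) = pos + 1 + (k : Int) := by push_cast; ring
            rw [this]; exact hk2
          · rw [pref_succ]
            intro s hs
            rcases List.mem_cons.mp hs with h' | h'
            · rw [h']; exact helm
            · exact hk3 s h'
          · rw [pref_succ]
            refine List.nodup_cons.mpr ⟨?_, hk4⟩
            intro hin
            exact (hk5 _ hin) (List.mem_append_right used List.mem_cons_self)
          · rw [pref_succ]
            intro s hs
            rcases List.mem_cons.mp hs with h' | h'
            · rw [h']; exact hmem
            · intro hu
              exact (hk5 s h') (List.mem_append_left _ hu)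
        · rintro ⟨k, hk1, hk2, hk3, hk4, hk5⟩
          cases k with
          | zero =>
            exfalso
            simp only [Nat.cast_zero, add_zero] at hk2
            rcases hk2 with h2 | h2 <;> rw [hel, h2] at helm
            · exact class_not_mod helm
            · exact interface_not_mod helm
          | succ k' =>
            rw [pref_succ] at hk3 hk4 hk5
            refine ⟨k', ?_, ?_, ?_, ?_, ?_⟩
            · push_cast at hk1 ⊢; omega
            · have : pos + 1 + (k' : Int) = pos + ((k' : ℕ) + 1 : ℕ) := by push_cast; ring
              rw [this]; exact hk2
            · intro s hs; exact hk3 s (List.mem_cons_of_mem _ hs)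
            · exact (List.nodup_cons.mp hk4).2
            · intro s hs hu
              rcases List.mem_append.mp hu with h' | h'
              · exact (hk5 s (List.mem_cons_of_mem _ hs)) h'
              · simp only [List.mem_singleton] at h'
                rw [hel] at h'
                exact (List.nodup_cons.mp hk4).1 (h' ▸ hs)
    · rw [if_neg hc]
      have helm : el ∉ CLASS_MODIFIER := by simpa using hc
      by_cases hci : el = "class" ∨ el = "interface"
      · have : (if el = "class" then true else if el = "interface" then true else false) = true := by
          rcases hci with h' | h' <;> simp [h']
        rw [this]
        simp only [true_iff]
        exact ⟨0, by simpa using h, by simpa using hci, by simp [pref_zero], by simp [pref_zero], by simp [pref_zero]⟩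
      · rw [not_or] at hci
        rw [if_neg hci.1, if_neg hci.2]
        simp only [Bool.false_eq_true, false_iff]
        rintro ⟨k, hk1, hk2, hk3, hk4, hk5⟩
        cases k with
        | zero =>
          simp only [Nat.cast_zero, add_zero] at hk2
          rcases hk2 with h2 | h2
          · exact hci.1 (hel ▸ h2)
          · exact hci.2 (hel ▸ h2)
        | succ k' =>
          have : el ∈ pref lstFile pos (k' + 1) := by
            rw [pref_succ]; exact List.mem_cons_self
          exact helm (hk3 el this)
  · rename_i h
    simp only [Bool.false_eq_true, false_iff]
    rintro ⟨k, hk1, _⟩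
    have : (0 : Int) ≤ (k : Int) := Int.natCast_nonneg k
    omega
termination_by ((lstFile.length : Int) - pos).toNat
decreasing_by omega

-- set(l) keeps a subsequence of l (first occurrences in order).
lemma ofList_sublist {α : Type} [BEq α] [LawfulBEq α] (l : List α) :
    (PySem.Set.ofList l).Sublist l := by
  induction l using List.reverseRecOn with
  | nil => simp [PySem.Set.ofList_nil]
  | append_singleton xs x ih =>
    rw [PySem.Set.ofList_append_singleton, PySem.Set.add_eq_ite]
    split
    · exact ih.trans (List.sublist_append_left xs [x])
    · exact ih.append (List.Sublist.refl [x])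

-- len(set(l)) = len(l) iff l has no duplicates.
lemma length_ofList_eq_iff_nodup {α : Type} [BEq α] [LawfulBEq α] (l : List α) :
    (PySem.Set.ofList l).length = l.length ↔ l.Nodup := by
  constructor
  · intro h
    have e := (ofList_sublist l).eq_of_length h
    exact e ▸ PySem.Set.nodup_ofList l
  · intro h
    rw [PySem.Set.ofList_eq_self_of_nodup l h]

-- The list Source B's inner comprehensions traverse is exactly pref.
lemma map_pyRange_eq_pref (lstFile : List String) (currentPos : Int) (k : ℕ) :
    ((PySem.List.pyRange 0 (k : Int) 1).map fun i =>
      (PySem.List.pyGet? lstFile (currentPos + i)).getD "") = pref lstFile currentPos k := by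
  rw [PySem.List.pyRange_one]
  unfold pref tok
  simp only [List.map_map]
  have : ((k : Int) - 0).toNat = k := by omega
  rw [this]
  apply List.map_congr_left
  intro i _
  simp

-- B's body at offset k decides Good with empty used (under Pre_).
lemma altBody_iff_good (lstFile : List String) (currentPos : Int) (k : ℕ)
    (hpre : -(lstFile.length : Int) ≤ currentPos) :
    altBody lstFile currentPos (k : Int) = true ↔ Good lstFile [] currentPos k := by
  unfold altBody Good
  simp only [Bool.and_eq_true, decide_eq_true_eq]
  constructor
  · rintro ⟨⟨⟨h1, h2⟩, h3⟩, h4⟩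
    have hg := pyGet?_eq_some_tok lstFile (currentPos + k) (by omega) h1
    rw [hg] at h2
    simp only [Bool.or_eq_true, decide_eq_true_eq] at h2
    refine ⟨h1, h2, ?_, ?_, by simp⟩
    · intro s hs
      rw [← map_pyRange_eq_pref] at hs
      rcases List.mem_map.mp hs with ⟨i, hi, hie⟩
      rw [List.all_eq_true] at h3
      have := h3 i hi
      rw [PySem.List.mem_pyRange_one] at hi
      have hg' := pyGet?_eq_some_tok lstFile (currentPos + i) (by omega) (by omega)
      rw [hg'] at this hie
      simp only [Option.getD_some] at hie
      rw [← hie]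
      simpa using this
    · rw [← length_ofList_eq_iff_nodup, ← map_pyRange_eq_pref]
      have hlen : (((PySem.List.pyRange 0 (k : Int) 1).map fun i =>
          (PySem.List.pyGet? lstFile (currentPos + i)).getD "").length) = k := by
        rw [List.length_map, PySem.List.length_pyRange_one]; omega
      omega
  · rintro ⟨h1, h2, h3, h4, _⟩
    have hg := pyGet?_eq_some_tok lstFile (currentPos + k) (by omega) h1
    refine ⟨⟨⟨h1, ?_⟩, ?_⟩, ?_⟩
    · rw [hg]; simpa using h2
    · rw [List.all_eq_true]
      intro i hi
      rw [PySem.List.mem_pyRange_one] at hi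
      have hg' := pyGet?_eq_some_tok lstFile (currentPos + i) (by omega) (by omega)
      rw [hg']
      have : tok lstFile (currentPos + i) ∈ pref lstFile currentPos k := by
        unfold pref
        refine List.mem_map.mpr ⟨i.toNat, ?_, ?_⟩
        · rw [List.mem_range]; omega
        · congr 1; omega
      simpa using h3 _ this
    · rw [map_pyRange_eq_pref]
      have := (length_ofList_eq_iff_nodup (pref lstFile currentPos k)).mpr h4
      have hlen : (pref lstFile currentPos k).length = k := by
        unfold pref; simp
      omega

-- Pigeonhole: a Good offset is at most 7 (distinct tokens from a 7-element list).
lemma good_le_seven (lstFile : List String) (currentPos : Int) (k : ℕ)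
    (hg : Good lstFile [] currentPos k) : k ≤ 7 := by
  obtain ⟨_, _, h3, h4, _⟩ := hg
  have hlen : (pref lstFile currentPos k).length = k := by unfold pref; simp
  have hsub : pref lstFile currentPos k ⊆ CLASS_MODIFIER := h3
  have hcard : (pref lstFile currentPos k).toFinset.card = k := by
    rw [List.toFinset_card_of_nodup h4, hlen]
  have hsubF : (pref lstFile currentPos k).toFinset ⊆ CLASS_MODIFIER.toFinset := by
    intro x hx
    rw [List.mem_toFinset] at hx ⊢
    exact hsub hx
  have := Finset.card_le_card hsubF
  have hcm : CLASS_MODIFIER.toFinset.card ≤ 7 := by decide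
  omega

-- ===== VERDICT (by name: the statement is the Claim_ definition above) =====
theorem isClassBeginning_py_spec : Claim_equal_isClassBeginning_py := by
  intro lstFile currentPos _ hpre
  unfold Spec_isClassBeginning_py isClassBeginning_py isClassBeginning_py_alt
  have hA := loop_iff_good lstFile [] currentPos hpre List.nodup_nil
  rw [Bool.eq_iff_iff, hA, List.any_eq_true]
  constructor
  · rintro ⟨k, hk⟩
    have hk7 := good_le_seven lstFile currentPos k hk
    refine ⟨(k : Int), ?_, ?_⟩
    · rw [PySem.List.mem_pyRange_one]
      constructor <;> [positivity; exact_mod_cast by omega]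
    · exact (altBody_iff_good lstFile currentPos k hpre).mpr hk
  · rintro ⟨k, hkmem, hkb⟩
    rw [PySem.List.mem_pyRange_one] at hkmem
    have hk0 : k = ((k.toNat : ℕ) : Int) := by omega
    rw [hk0] at hkb
    exact ⟨k.toNat, (altBody_iff_good lstFile currentPos k.toNat hpre).mp hkb⟩
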